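-- pv_equiv track=rewrite | github.com/weekmo/master_python | matrix6.py | matrix_set_part
-- ===== SOURCE A (Python) =====
-- def matrix_set_part(m, ii, jj, n):
--    """
--    Given matrix m, replace the submatrix starting at row i, column j
--    with the matrix n.
--
--    Matrices are represented as nested lists, saved row-major.
--
--    >>> matrix_set_part([[1,2],[3,4]],0,0,[[9]])
--    [[9, 2], [3, 4]]
--    >>> matrix_set_part([[1,2],[3,4]],1,1,[[9]])
--    [[1, 2], [3, 9]]
--    >>> matrix_set_part([[1,2,3],[4,5,6],[7,8,9],[10,11,12]],0,0,[[-1,-2]])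
--    [[-1, -2, 3], [4, 5, 6], [7, 8, 9], [10, 11, 12]]
--    >>> matrix_set_part([[1,2,3],[4,5,6],[7,8,9],[10,11,12]],0,0,[[-1],[-2]])
--    [[-1, 2, 3], [-2, 5, 6], [7, 8, 9], [10, 11, 12]]
--    """
--    rows = len(m)     # number of rows of m
--    cols = len(m[0])  # number of cols of m
--    nrows = len(n)     # number of rows of n
--    ncols = len(n[0])  # number of cols of n
--    assert ii >= 0
--    assert jj >= 0
--    assert ii+nrows <= rows
--    assert jj+ncols <= cols
--    return [[n[i-ii][j-jj] if i >= ii and i < ii+nrows and j >= jj and j < jj+ncols else m[i][j] for j in range(cols)] for i in range(rows)]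
-- ===== SOURCE B (Python) =====
-- def matrix_set_part(m, ii, jj, n):
--     rows = len(m)     # number of rows of m
--     cols = len(m[0])  # number of cols of m
--     nrows = len(n)     # number of rows of n
--     ncols = len(n[0])  # number of cols of n
--     assert ii >= 0
--     assert jj >= 0
--     assert ii + nrows <= rows
--     assert jj + ncols <= cols
--     result = [row[:] for row in m]
--     for r in range(nrows):
--         for c in range(ncols):
--             result[ii + r][jj + c] = n[r][c]
--     return result
-- ===== Notes on version B (the rewrite author's own statement) =====
-- stated objective: simpler
-- what changed: Instead of one full-matrix comprehension testing every cell against the region bounds, B copies m row-by-row and then overwrites only the nrows*ncols submatrix cells in place.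
-- outside the precondition, e.g. on matrix_set_part([[1, 2], [3, 4, 5]], 0, 0, [[9]]): A returns [[9, 2], [3, 4]], B returns [[9, 2], [3, 4, 5]]
import Mathlib
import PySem

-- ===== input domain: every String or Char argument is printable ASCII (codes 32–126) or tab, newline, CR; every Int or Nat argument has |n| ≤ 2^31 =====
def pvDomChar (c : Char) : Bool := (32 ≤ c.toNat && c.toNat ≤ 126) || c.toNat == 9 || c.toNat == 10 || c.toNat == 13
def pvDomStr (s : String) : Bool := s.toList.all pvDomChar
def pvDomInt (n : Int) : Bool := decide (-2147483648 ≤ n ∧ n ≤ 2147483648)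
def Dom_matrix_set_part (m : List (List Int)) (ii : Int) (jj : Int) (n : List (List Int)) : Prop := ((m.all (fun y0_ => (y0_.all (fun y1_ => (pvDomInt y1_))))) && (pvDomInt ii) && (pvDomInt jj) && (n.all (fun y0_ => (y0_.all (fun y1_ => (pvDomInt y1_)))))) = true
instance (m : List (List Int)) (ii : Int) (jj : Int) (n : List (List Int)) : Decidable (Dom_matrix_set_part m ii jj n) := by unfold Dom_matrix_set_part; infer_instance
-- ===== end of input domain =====

-- B copies m row-by-row and then overwrites only the submatrix cells, replacing A's
-- single full-matrix comprehension with an embedded per-cell region test (objective: simpler).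


-- ===== PORT A =====
def matrix_set_part (m : List (List Int)) (ii : Int) (jj : Int) (n : List (List Int)) : List (List Int) :=
  let rows : Int := m.length
  let cols : Int := (PySem.List.pyGetD m 0 []).length
  let nrows : Int := n.length
  let ncols : Int := (PySem.List.pyGetD n 0 []).length
  -- the four asserts never fire inside Pre_; the comprehension is a nested map over range
  (PySem.List.pyRange 0 rows 1).map (fun i =>
    (PySem.List.pyRange 0 cols 1).map (fun j =>
      if ii ≤ i ∧ i < ii + nrows ∧ jj ≤ j ∧ j < jj + ncols then
        PySem.List.pyGetD (PySem.List.pyGetD n (i - ii) []) (j - jj) 0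
      else
        PySem.List.pyGetD (PySem.List.pyGetD m i []) j 0))

-- ===== PORT B =====
-- result[i][j] = v is transliterated with pySetD/pyGetD; Pre_ guarantees all indices
-- are nonnegative and in range, where pySetD/pyGetD are exact.
def matrix_set_part_alt (m : List (List Int)) (ii : Int) (jj : Int) (n : List (List Int)) : List (List Int) :=
  let nrows : Int := n.length
  let ncols : Int := (PySem.List.pyGetD n 0 []).length
  let result := m.map (fun row => PySem.List.slice row none none)   -- [row[:] for row in m]
  (PySem.List.pyRange 0 nrows 1).foldl (fun res r =>
    (PySem.List.pyRange 0 ncols 1).foldl (fun res c =>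
      PySem.List.pySetD res (ii + r)
        (PySem.List.pySetD (PySem.List.pyGetD res (ii + r) []) (jj + c)
          (PySem.List.pyGetD (PySem.List.pyGetD n r []) c 0))) res) result

-- ===== PRECONDITION & SPEC =====
-- Pre_ excludes inputs where A raises (empty m or n, a failing assert, a row too short for
-- an access) and, beyond that, non-rectangular m with rows LONGER than m[0]: there A returns
-- the row silently truncated to len(m[0]) while B keeps the whole copied row — an accidental
-- corner of malformed input on which both values are defensible.
def Pre_matrix_set_part (m : List (List Int)) (ii : Int) (jj : Int) (n : List (List Int)) : Prop :=
  m ≠ [] ∧ n ≠ [] ∧ 0 ≤ ii ∧ 0 ≤ jj ∧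
  ii + (n.length : Int) ≤ (m.length : Int) ∧
  jj + ((n.headD []).length : Int) ≤ ((m.headD []).length : Int) ∧
  (∀ row ∈ m, row.length = (m.headD []).length) ∧
  (∀ row ∈ n, (n.headD []).length ≤ row.length)
instance (m : List (List Int)) (ii : Int) (jj : Int) (n : List (List Int)) : Decidable (Pre_matrix_set_part m ii jj n) := by unfold Pre_matrix_set_part; infer_instance

def pvWitness_matrix_set_part : List (List Int) × Int × Int × List (List Int) :=
  ([[1, 2], [3, 4]], 1, 0, [[9, 8]])

def Spec_matrix_set_part (m : List (List Int)) (ii : Int) (jj : Int) (n : List (List Int)) (out : List (List Int)) : Prop := out = matrix_set_part_alt m ii jj n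
instance (m : List (List Int)) (ii : Int) (jj : Int) (n : List (List Int)) (out : List (List Int)) : Decidable (Spec_matrix_set_part m ii jj n out) := by unfold Spec_matrix_set_part; infer_instance

-- ===== CLAIM (what is proved, stated in full; the proofs are below) =====
def Claim_equal_matrix_set_part : Prop := ∀ (m : List (List Int)) (ii : Int) (jj : Int) (n : List (List Int)), Dom_matrix_set_part m ii jj n → Pre_matrix_set_part m ii jj n → Spec_matrix_set_part m ii jj n (matrix_set_part m ii jj n)

-- ===== LEMMAS AND PROOFS =====

-- B's inner loop over one row: write nrow[c] into row[b+c] for c = 0..k-1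
def pvPatchRow (nrow : List Int) (b : Nat) (k : Nat) (row : List Int) : List Int :=
  (PySem.List.pyRange 0 (k : Int) 1).foldl
    (fun row c => PySem.List.pySetD row ((b : Int) + c) (PySem.List.pyGetD nrow c 0)) row

theorem pvPatchRow_zero (nrow : List Int) (b : Nat) (row : List Int) :
    pvPatchRow nrow b 0 row = row := by
  simp [pvPatchRow, PySem.List.pyRange_one_eq_nil]

theorem pvPatchRow_succ (nrow : List Int) (b k : Nat) (row : List Int) :
    pvPatchRow nrow b (k + 1) row
      = (pvPatchRow nrow b k row).set (b + k) (PySem.List.pyGetD nrow (k : Int) 0) := by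
  unfold pvPatchRow
  rw [show (((k + 1 : Nat) : Int)) = (k : Int) + 1 by push_cast; ring,
    PySem.List.pyRange_one_succ_right (by positivity), List.foldl_append]
  simp only [List.foldl_cons, List.foldl_nil]
  rw [show ((b : Int) + (k : Int)) = ((b + k : Nat) : Int) by push_cast; ring,
    PySem.List.pySetD_natCast]

theorem pvPatchRow_length (nrow : List Int) (b k : Nat) (row : List Int) :
    (pvPatchRow nrow b k row).length = row.length := by
  induction k with
  | zero => rw [pvPatchRow_zero]
  | succ k ih => rw [pvPatchRow_succ, List.length_set, ih]

theorem pvPatchRow_getElem? (nrow : List Int) (b k : Nat) (row : List Int)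
    (hk : b + k ≤ row.length) (j : Nat) :
    (pvPatchRow nrow b k row)[j]?
      = if b ≤ j ∧ j < b + k then some (PySem.List.pyGetD nrow ((j - b : Nat) : Int) 0)
        else row[j]? := by
  induction k with
  | zero =>
      rw [pvPatchRow_zero, if_neg]; omega
  | succ k ih =>
      rw [pvPatchRow_succ, List.getElem?_set]
      by_cases hj : b + k = j
      · subst hj
        rw [if_pos rfl, if_pos (by rw [pvPatchRow_length]; omega), if_pos (by omega)]
        rw [show ((k : Int)) = ((b + k - b : Nat) : Int) by omega]
      · rw [if_neg hj, ih (by omega)]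
        by_cases hr : b ≤ j ∧ j < b + k
        · rw [if_pos hr, if_pos (by omega)]
        · rw [if_neg hr, if_neg (by omega)]

-- B's inner loop on the whole result list equals a single row replacement
theorem pvInner_eq (nn : List (List Int)) (a b r : Nat) (k : Nat) (res : List (List Int))
    (hin : a + r < res.length)
    (hrow : b + k ≤ (res.getD (a + r) []).length) :
    (PySem.List.pyRange 0 (k : Int) 1).foldl (fun res c =>
        PySem.List.pySetD res ((a : Int) + (r : Int))
          (PySem.List.pySetD (PySem.List.pyGetD res ((a : Int) + (r : Int)) []) ((b : Int) + c)
            (PySem.List.pyGetD (PySem.List.pyGetD nn (r : Int) []) c 0))) res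
      = res.set (a + r) (pvPatchRow (PySem.List.pyGetD nn (r : Int) []) b k (res.getD (a + r) [])) := by
  have hcast : ((a : Int) + (r : Int)) = ((a + r : Nat) : Int) := by push_cast; ring
  induction k with
  | zero =>
      rw [show ((0 : Nat) : Int) = (0 : Int) by norm_num, PySem.List.pyRange_one_eq_nil le_rfl,
        List.foldl_nil, pvPatchRow_zero]
      rw [List.getD_eq_getElem?_getD, List.getElem?_eq_getElem hin]
      exact (List.set_getElem_self hin).symm
  | succ k ih =>
      rw [show (((k + 1 : Nat) : Int)) = (k : Int) + 1 by push_cast; ring,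
        PySem.List.pyRange_one_succ_right (by positivity), List.foldl_append, ih (by omega)]
      simp only [List.foldl_cons, List.foldl_nil]
      have hgd : PySem.List.pyGetD
          (res.set (a + r) (pvPatchRow (PySem.List.pyGetD nn (r : Int) []) b k (res.getD (a + r) [])))
          ((a : Int) + (r : Int)) []
          = pvPatchRow (PySem.List.pyGetD nn (r : Int) []) b k (res.getD (a + r) []) := by
        rw [hcast, PySem.List.pyGetD_natCast, List.getD_eq_getElem?_getD, List.getElem?_set,
          if_pos rfl, if_pos hin]
        rfl
      rw [hgd, hcast, PySem.List.pySetD_natCast, List.set_set,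
        show ((b : Int) + (k : Int)) = ((b + k : Nat) : Int) by push_cast; ring,
        PySem.List.pySetD_natCast, ← pvPatchRow_succ]

-- B's outer loop: length preserved and an elementwise characterisation
theorem pvOuter_char (nn mm : List (List Int)) (a b : Nat) (k : Nat)
    (hk : a + k ≤ mm.length)
    (hrow : ∀ l ∈ mm, b + (PySem.List.pyGetD nn 0 []).length ≤ l.length) :
    ((PySem.List.pyRange 0 (k : Int) 1).foldl (fun res r =>
        (PySem.List.pyRange 0 (((PySem.List.pyGetD nn 0 []).length : Nat) : Int) 1).foldl (fun res c =>
          PySem.List.pySetD res ((a : Int) + r)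
            (PySem.List.pySetD (PySem.List.pyGetD res ((a : Int) + r) []) ((b : Int) + c)
              (PySem.List.pyGetD (PySem.List.pyGetD nn r []) c 0))) res) mm).length = mm.length
    ∧ ∀ i : Nat,
      ((PySem.List.pyRange 0 (k : Int) 1).foldl (fun res r =>
        (PySem.List.pyRange 0 (((PySem.List.pyGetD nn 0 []).length : Nat) : Int) 1).foldl (fun res c =>
          PySem.List.pySetD res ((a : Int) + r)
            (PySem.List.pySetD (PySem.List.pyGetD res ((a : Int) + r) []) ((b : Int) + c)
              (PySem.List.pyGetD (PySem.List.pyGetD nn r []) c 0))) res) mm)[i]?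
      = if a ≤ i ∧ i < a + k then
          some (pvPatchRow (PySem.List.pyGetD nn ((i - a : Nat) : Int) []) b
            (PySem.List.pyGetD nn 0 []).length (mm.getD i []))
        else mm[i]? := by
  induction k with
  | zero =>
      refine ⟨?_, ?_⟩
      · rw [show ((0 : Nat) : Int) = (0 : Int) by norm_num,
          PySem.List.pyRange_one_eq_nil le_rfl, List.foldl_nil]
      · intro i
        rw [show ((0 : Nat) : Int) = (0 : Int) by norm_num,
          PySem.List.pyRange_one_eq_nil le_rfl, List.foldl_nil, if_neg]
        omega
  | succ k ih =>
      obtain ⟨ihlen, ihget⟩ := ih (by omega)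
      have hgetak' := ihget (a + k)
      rw [if_neg (by omega)] at hgetak'
      have hak : a + k < mm.length := by omega
      have hgetak : ((PySem.List.pyRange 0 (k : Int) 1).foldl (fun res r =>
          (PySem.List.pyRange 0 (((PySem.List.pyGetD nn 0 []).length : Nat) : Int) 1).foldl (fun res c =>
            PySem.List.pySetD res ((a : Int) + r)
              (PySem.List.pySetD (PySem.List.pyGetD res ((a : Int) + r) []) ((b : Int) + c)
                (PySem.List.pyGetD (PySem.List.pyGetD nn r []) c 0))) res) mm).getD (a + k) []
          = mm.getD (a + k) [] := by
        rw [List.getD_eq_getElem?_getD, hgetak', ← List.getD_eq_getElem?_getD]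
      have hmemak : mm.getD (a + k) [] ∈ mm := by
        have : mm.getD (a + k) [] = mm[a + k]'hak := by
          rw [List.getD_eq_getElem?_getD, List.getElem?_eq_getElem hak]
          rfl
        rw [this]
        exact List.getElem_mem hak
      have hinner := pvInner_eq nn a b k (PySem.List.pyGetD nn 0 []).length
        ((PySem.List.pyRange 0 (k : Int) 1).foldl (fun res r =>
          (PySem.List.pyRange 0 (((PySem.List.pyGetD nn 0 []).length : Nat) : Int) 1).foldl (fun res c =>
            PySem.List.pySetD res ((a : Int) + r)
              (PySem.List.pySetD (PySem.List.pyGetD res ((a : Int) + r) []) ((b : Int) + c)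
                (PySem.List.pyGetD (PySem.List.pyGetD nn r []) c 0))) res) mm)
        (by rw [ihlen]; omega)
        (by rw [hgetak]; exact hrow _ hmemak)
      rw [show (((k + 1 : Nat) : Int)) = (k : Int) + 1 by push_cast; ring,
        PySem.List.pyRange_one_succ_right (by positivity), List.foldl_append]
      simp only [List.foldl_cons, List.foldl_nil]
      rw [hinner, hgetak]
      refine ⟨?_, ?_⟩
      · rw [List.length_set, ihlen]
      · intro i
        rw [List.getElem?_set]
        by_cases hi : a + k = i
        · subst hi
          rw [if_pos rfl, if_pos (by rw [ihlen]; omega), if_pos (by omega),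
            show ((k : Int)) = ((a + k - a : Nat) : Int) by omega]
        · rw [if_neg hi, ihget i]
          by_cases hr : a ≤ i ∧ i < a + k
          · rw [if_pos hr, if_pos (by omega)]
          · rw [if_neg hr, if_neg (by omega)]

-- ===== VERDICT (by name: the statement is the Claim_ definition above) =====
theorem matrix_set_part_spec : Claim_equal_matrix_set_part := by
  intro m ii jj n _hdom hpre
  obtain ⟨hm, hn, hii, hjj, hR, hC, hrect, hnrow⟩ := hpre
  unfold Spec_matrix_set_part
  lift ii to Nat using hii with a
  lift jj to Nat using hjj with b
  simp only [matrix_set_part, matrix_set_part_alt]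
  have hC0 : PySem.List.pyGetD m (0 : Int) [] = m.headD [] := by
    cases m with
    | nil => exact absurd rfl hm
    | cons x xs =>
        rw [show ((0 : Int)) = ((0 : Nat) : Int) by norm_num, PySem.List.pyGetD_natCast]; rfl
  have hNC0 : PySem.List.pyGetD n (0 : Int) [] = n.headD [] := by
    cases n with
    | nil => exact absurd rfl hn
    | cons x xs =>
        rw [show ((0 : Int)) = ((0 : Nat) : Int) by norm_num, PySem.List.pyGetD_natCast]; rfl
  have hres : m.map (fun row => PySem.List.slice row none none) = m := by
    simp [PySem.List.slice_none_none]
  rw [hres, hC0]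
  obtain ⟨hlen, hget⟩ := pvOuter_char n m a b n.length
    (by omega)
    (by intro l hl; rw [hNC0, hrect l hl]; omega)
  apply List.ext_getElem?
  intro i
  rw [hget i]
  by_cases hiR : i < m.length
  · rw [PySem.List.getElem?_map_pyRange_zero _ m.length i hiR]
    have hmi : PySem.List.pyGetD m ((i : Nat) : Int) [] = m[i] := by
      rw [PySem.List.pyGetD_natCast, List.getD_eq_getElem?_getD, List.getElem?_eq_getElem hiR]
      rfl
    have hmi' : m.getD i [] = m[i] := by
      rw [List.getD_eq_getElem?_getD, List.getElem?_eq_getElem hiR]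
      rfl
    have hrowlen : (m[i]'hiR).length = (m.headD []).length := hrect _ (List.getElem_mem hiR)
    by_cases hreg : a ≤ i ∧ i < a + n.length
    · rw [if_pos hreg]
      congr 1
      have hnc : b + (PySem.List.pyGetD n (0 : Int) []).length ≤ (m[i]'hiR).length := by
        rw [hNC0, hrowlen]; omega
      apply List.ext_getElem?
      intro j
      rw [hmi', pvPatchRow_getElem? _ _ _ _ hnc j]
      by_cases hjC : j < (m.headD []).length
      · rw [PySem.List.getElem?_map_pyRange_zero _ (m.headD []).length j hjC]
        by_cases hcol : b ≤ j ∧ j < b + (PySem.List.pyGetD n (0 : Int) []).length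
        · rw [if_pos hcol, if_pos (by omega)]
          rw [show ((i : Int) - (a : Int)) = ((i - a : Nat) : Int) by omega,
            show ((j : Int) - (b : Int)) = ((j - b : Nat) : Int) by omega]
        · rw [if_neg hcol, if_neg (by omega), hmi,
            List.getElem?_eq_getElem (by omega : j < (m[i]'hiR).length)]
          rw [PySem.List.pyGetD_natCast, List.getD_eq_getElem?_getD,
            List.getElem?_eq_getElem (by omega : j < (m[i]'hiR).length)]
          rfl
      · rw [if_neg (by omega),
          List.getElem?_eq_none (by rw [List.length_map, PySem.List.length_pyRange_one]; omega),
          List.getElem?_eq_none (by omega)]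
    · rw [if_neg hreg, List.getElem?_eq_getElem hiR]
      congr 1
      have hif : ∀ j ∈ PySem.List.pyRange 0 (((m.headD []).length : Nat) : Int) 1,
          (if (a : Int) ≤ (i : Int) ∧ (i : Int) < (a : Int) + (n.length : Int) ∧
              (b : Int) ≤ j ∧ j < (b : Int) + ((PySem.List.pyGetD n (0 : Int) []).length : Int) then
            PySem.List.pyGetD (PySem.List.pyGetD n ((i : Int) - (a : Int)) []) (j - (b : Int)) 0
          else PySem.List.pyGetD (PySem.List.pyGetD m ((i : Nat) : Int) []) j 0)
          = PySem.List.pyGetD (PySem.List.pyGetD m ((i : Nat) : Int) []) j 0 := by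
        intro j _
        rw [if_neg (by omega)]
      rw [List.map_congr_left hif, hmi,
        show (((m.headD []).length : Nat) : Int) = PySem.List.len (m[i]'hiR) by
          rw [PySem.List.len_eq]; exact_mod_cast congrArg Nat.cast hrowlen.symm]
      exact PySem.List.map_pyGetD_pyRange_zero (m[i]'hiR) 0
  · rw [if_neg (by omega),
      List.getElem?_eq_none (by rw [List.length_map, PySem.List.length_pyRange_one]; omega),
      List.getElem?_eq_none (by omega)]
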